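-- pv_equiv track=rewrite | github.com/ZZKer/YHtWtG-Randomizer | requirementCalculations.py | reduceReqs
-- ===== SOURCE A (Python) =====
-- def reduceReqs(reqs):
--     """
--     Remove requirement values which represent a superset of another requirement.
--     Example: [3 (blue orb, red orb),7 (blue orb, red orb, boots)]
--           -> [3] (boots are not needed)
--
--     """
--     reducedReqs = []
--     reqs.sort()
--     for req in reqs:
--         add = True
--         for newReq in reducedReqs:
--             if not newReq & ~ req:
--                 add = False
--                 break
--             elif not req & ~ newReq:
--                 add = False
--                 break
--         if add:
--             reducedReqs = reducedReqs + [req]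
--     return reducedReqs
-- ===== SOURCE B (Python) =====
-- def reduceReqs(reqs):
--     """
--     Remove requirement values which represent a superset of another requirement.
--     Example: [3 (blue orb, red orb),7 (blue orb, red orb, boots)]
--           -> [3] (boots are not needed)
--
--     """
--     reqs.sort()
--     out = []
--     rest = reqs
--     while rest:
--         m = rest[0]
--         out.append(m)
--         rest = [r for r in rest[1:] if m & ~r and r & ~m]
--     return out
-- ===== Notes on version B (the rewrite author's own statement) =====
-- stated objective: alternative
-- what changed: A grows a kept-antichain accumulator and tests every element against it; B repeatedly peels the minimum of the sorted remainder, emits it, and filters all elements comparable to it out of the remainder, so no kept list is ever scanned.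
import Mathlib
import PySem

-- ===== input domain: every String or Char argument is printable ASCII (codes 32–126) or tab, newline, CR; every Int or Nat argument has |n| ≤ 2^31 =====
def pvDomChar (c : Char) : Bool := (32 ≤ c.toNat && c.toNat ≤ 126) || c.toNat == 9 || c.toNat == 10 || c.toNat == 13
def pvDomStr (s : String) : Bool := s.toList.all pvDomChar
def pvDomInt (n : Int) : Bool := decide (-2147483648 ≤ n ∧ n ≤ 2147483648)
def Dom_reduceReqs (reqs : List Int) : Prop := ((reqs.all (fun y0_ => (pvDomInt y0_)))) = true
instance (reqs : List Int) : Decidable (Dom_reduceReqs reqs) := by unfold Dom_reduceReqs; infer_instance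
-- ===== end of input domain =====

-- B replaces A's growing kept-accumulator scan by a peel loop: emit the minimum of the sorted
-- remainder and filter every element comparable to it out of the remainder (alternative
-- decomposition, same cost). Both A and B sort their argument in place; the equivalence proved
-- here is about the RETURN value.

-- ===== PORT A =====
def reduceReqs (reqs : List Int) : List Int :=
  (PySem.List.sorted reqs (fun x => x) false).foldl
    (fun reducedReqs req =>
      if reducedReqs.any (fun newReq =>
            (Int.land newReq (Int.lnot req) == 0) || (Int.land req (Int.lnot newReq) == 0))
      then reducedReqs
      else reducedReqs ++ [req]) []

-- ===== PORT B =====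
-- the while-loop of Source B: head of the remainder is emitted, the tail is filtered
def pvPeel : List Int → List Int
  | [] => []
  | m :: rest =>
      m :: pvPeel (rest.filter (fun r =>
        (!(Int.land m (Int.lnot r) == 0)) && (!(Int.land r (Int.lnot m) == 0))))
termination_by l => l.length
decreasing_by
  simp
  exact List.length_filter_le _ _

def reduceReqs_alt (reqs : List Int) : List Int :=
  pvPeel (PySem.List.sorted reqs (fun x => x) false)

-- ===== PRECONDITION & SPEC =====
def Spec_reduceReqs (reqs : List Int) (out : List Int) : Prop := out = reduceReqs_alt reqs
instance (reqs : List Int) (out : List Int) : Decidable (Spec_reduceReqs reqs out) := by unfold Spec_reduceReqs; infer_instance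

-- ===== CLAIM (what is proved, stated in full; the proofs are below) =====
def Claim_equal_reduceReqs : Prop := ∀ (reqs : List Int), Dom_reduceReqs reqs → Spec_reduceReqs reqs (reduceReqs reqs)

-- ===== LEMMAS AND PROOFS =====

-- A's loop body, named for the proof
def pvStep (acc : List Int) (req : Int) : List Int :=
  if acc.any (fun newReq =>
        (Int.land newReq (Int.lnot req) == 0) || (Int.land req (Int.lnot newReq) == 0))
  then acc else acc ++ [req]

theorem a_eq_foldl (reqs : List Int) :
    reduceReqs reqs = (PySem.List.sorted reqs (fun x => x) false).foldl pvStep [] := rfl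

-- comparability test shared by both programs
def pvComp (a b : Int) : Bool :=
  (Int.land a (Int.lnot b) == 0) || (Int.land b (Int.lnot a) == 0)

theorem pvStep_eq (acc : List Int) (req : Int) :
    pvStep acc req = if acc.any (fun k => pvComp k req) then acc else acc ++ [req] := rfl

theorem pvPeel_cons (m : Int) (rest : List Int) :
    pvPeel (m :: rest) = m :: pvPeel (rest.filter (fun r => !pvComp m r)) := by
  rw [pvPeel.eq_2]
  congr 2
  apply List.filter_congr
  intro x _
  simp [pvComp]

-- the invariant: A's fold from any accumulator equals the accumulator followed by
-- the peel of the elements not comparable to anything already kept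
theorem foldl_peel (l : List Int) : ∀ acc : List Int,
    l.foldl pvStep acc = acc ++ pvPeel (l.filter (fun r => !(acc.any (fun k => pvComp k r)))) := by
  induction l with
  | nil => intro acc; simp [pvPeel.eq_1]
  | cons r t ih =>
    intro acc
    rw [List.foldl_cons, pvStep_eq]
    by_cases h : acc.any (fun k => pvComp k r) = true
    · rw [if_pos h, ih acc]
      congr 2
      rw [List.filter_cons]
      simp [h]
    · rw [if_neg h, ih (acc ++ [r]), List.filter_cons]
      have hr : (!(acc.any (fun k => pvComp k r))) = true := by simp [h]
      rw [hr, if_pos rfl, pvPeel_cons, List.filter_filter, List.append_assoc,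
        List.singleton_append]
      congr 3
      apply List.filter_congr
      intro x _
      simp only [List.any_append, List.any_cons, List.any_nil, Bool.or_false,
        Bool.not_or, Bool.and_comm]

-- ===== VERDICT (by name: the statement is the Claim_ definition above) =====
theorem reduceReqs_spec : Claim_equal_reduceReqs := by
  unfold Claim_equal_reduceReqs Spec_reduceReqs
  intro reqs _
  rw [a_eq_foldl, foldl_peel]
  simp [reduceReqs_alt]
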